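-- pv_equiv track=rewrite | github.com/jyoti2000-star/CASM | src/core/pretty.py | _final_cleanup
-- ===== SOURCE A (Python) =====
-- def _final_cleanup(assembly_code: str) -> str:
--     """Final cleanup and formatting"""
--     lines = assembly_code.split('\n')
--     cleaned_lines = []
--
--     prev_empty = False
--
--     for line in lines:
--         # Remove excessive empty lines
--         if not line.strip():
--             if not prev_empty:
--                 cleaned_lines.append('')
--             prev_empty = True
--         else:
--             cleaned_lines.append(line)
--             prev_empty = False
--
--     # Ensure proper spacing around sections
--     final_lines = []
--     for i, line in enumerate(cleaned_lines):
--         stripped = line.strip()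
--
--         # Add spacing before major sections
--         if (stripped.startswith('section') and i > 0 and
--             cleaned_lines[i-1].strip() and
--             not cleaned_lines[i-1].strip().startswith('section')):
--             final_lines.append('')
--
--         final_lines.append(line)
--
--     return '\n'.join(final_lines)
-- ===== SOURCE B (Python) =====
-- def _final_cleanup(assembly_code: str) -> str:
--     """Single fused pass: collapse blank runs and insert section spacers on the fly."""
--     out = []
--     prev_empty = False
--     prev_line = None  # last emitted cleaned line (spacers excluded)
--     for line in assembly_code.split('\n'):
--         if not line.strip():
--             if not prev_empty:
--                 out.append('')
--                 prev_line = ''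
--             prev_empty = True
--         else:
--             if (line.strip().startswith('section') and prev_line is not None
--                     and prev_line.strip() and not prev_line.strip().startswith('section')):
--                 out.append('')
--             out.append(line)
--             prev_line = line
--             prev_empty = False
--     return '\n'.join(out)
-- ===== Notes on version B (the rewrite author's own statement) =====
-- stated objective: alternative
-- what changed: The two sequential passes (blank-collapsing pass, then an index-based second pass that looks back at cleaned_lines[i-1] to insert section spacers) are fused into one linear scan that tracks prev_empty and the last emitted cleaned line, inserting spacers on the fly.
import Mathlib
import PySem

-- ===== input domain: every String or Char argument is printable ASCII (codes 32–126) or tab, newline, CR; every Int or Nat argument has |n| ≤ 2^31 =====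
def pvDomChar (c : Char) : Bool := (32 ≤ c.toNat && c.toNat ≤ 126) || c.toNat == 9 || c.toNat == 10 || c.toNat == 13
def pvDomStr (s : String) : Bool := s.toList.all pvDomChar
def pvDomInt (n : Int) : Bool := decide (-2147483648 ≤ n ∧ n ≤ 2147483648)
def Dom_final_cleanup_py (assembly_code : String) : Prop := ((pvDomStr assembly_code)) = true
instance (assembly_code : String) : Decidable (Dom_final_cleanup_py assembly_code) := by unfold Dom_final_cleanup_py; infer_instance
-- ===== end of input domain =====

-- B fuses A's two passes (blank collapsing, then index-based spacer insertion) into one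
-- linear scan carrying prev_empty and the last emitted cleaned line; same output, one pass.

-- ===== PORT A =====
-- pass 1: collapse runs of blank lines (state: accumulated list, prev_empty)
def pvA_step1 (st : List String × Bool) (line : String) : List String × Bool :=
  if PySem.Str.strip line = "" then
    (if st.2 = false then st.1 ++ [""] else st.1, true)
  else
    (st.1 ++ [line], false)

-- pass 2 body: spacer before 'section' lines, looking back at cleaned[i-1]
def pvA_step2 (cleaned : List String) (acc : List String) (p : Int × String) : List String :=
  let stripped := PySem.Str.strip p.2
  let acc' :=
    if PySem.Str.startswith stripped "section" && decide (p.1 > 0) &&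
       decide (PySem.Str.strip ((PySem.List.pyGet? cleaned (p.1 - 1)).getD "") ≠ "") &&
       !(PySem.Str.startswith (PySem.Str.strip ((PySem.List.pyGet? cleaned (p.1 - 1)).getD "")) "section")
    then acc ++ [""] else acc
  acc' ++ [p.2]

def final_cleanup_py (assembly_code : String) : String :=
  let lines := (PySem.Str.split? assembly_code "\n").getD []
  let cleaned := (lines.foldl pvA_step1 ([], false)).1
  let finalLines := (PySem.List.enumerate cleaned 0).foldl (pvA_step2 cleaned) []
  PySem.Str.join "\n" finalLines

-- ===== PORT B =====
-- single pass; state: (out, prev_empty, last emitted cleaned line or none)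
def pvB_step (st : List String × Bool × Option String) (line : String) :
    List String × Bool × Option String :=
  if PySem.Str.strip line = "" then
    if st.2.1 = false then (st.1 ++ [""], true, some "") else (st.1, true, st.2.2)
  else
    let spacer :=
      PySem.Str.startswith (PySem.Str.strip line) "section" &&
      (match st.2.2 with
       | none => false
       | some p => decide (PySem.Str.strip p ≠ "") &&
                   !(PySem.Str.startswith (PySem.Str.strip p) "section"))
    ((if spacer then st.1 ++ ["", line] else st.1 ++ [line]), false, some line)

def final_cleanup_py_alt (assembly_code : String) : String :=
  let st := ((PySem.Str.split? assembly_code "\n").getD []).foldl pvB_step ([], false, none)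
  PySem.Str.join "\n" st.1

-- ===== PRECONDITION & SPEC =====
def Spec_final_cleanup_py (assembly_code : String) (out : String) : Prop := out = final_cleanup_py_alt assembly_code
instance (assembly_code : String) (out : String) : Decidable (Spec_final_cleanup_py assembly_code out) := by unfold Spec_final_cleanup_py; infer_instance

-- ===== CLAIM (what is proved, stated in full; the proofs are below) =====
def Claim_equal_final_cleanup_py : Prop := ∀ (assembly_code : String), Dom_final_cleanup_py assembly_code → Spec_final_cleanup_py assembly_code (final_cleanup_py assembly_code)

-- ===== LEMMAS AND PROOFS =====

-- recursive form of A's pass 1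
def pvC1 (pe : Bool) : List String → List String
  | [] => []
  | l :: ls =>
    if PySem.Str.strip l = "" then
      (if pe = false then [""] else []) ++ pvC1 true ls
    else l :: pvC1 false ls

-- guard of the spacer condition, in terms of the previous cleaned line
def pvG : Option String → Bool
  | none => false
  | some p => decide (PySem.Str.strip p ≠ "") && !(PySem.Str.startswith (PySem.Str.strip p) "section")

-- recursive form of A's pass 2, carrying the previous cleaned line
def pvSp (prev : Option String) : List String → List String
  | [] => []
  | l :: ls =>
    (if PySem.Str.startswith (PySem.Str.strip l) "section" && pvG prev then ["", l] else [l]) ++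
    pvSp (some l) ls

theorem pvA1_eq (ls : List String) : ∀ (acc : List String) (pe : Bool),
    (ls.foldl pvA_step1 (acc, pe)).1 = acc ++ pvC1 pe ls := by
  induction ls with
  | nil => intro acc pe; simp [pvC1]
  | cons l ls ih =>
    intro acc pe
    by_cases h : PySem.Str.strip l = "" <;> cases pe <;>
      simp [pvA_step1, pvC1, h, ih]

theorem pvA2_eq (cs : List String) : ∀ (rest : List String) (k : Nat) (acc : List String),
    cs.drop k = rest →
    (PySem.List.enumerate rest (k : Int)).foldl (pvA_step2 cs) acc =
      acc ++ pvSp (if k = 0 then none else cs[k-1]?.getD "" |> some) rest := by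
  intro rest
  induction rest with
  | nil => intro k acc _; simp [PySem.List.enumerate, pvSp]
  | cons l ls ih =>
    intro k acc hdrop
    have hk : k < cs.length := by
      by_contra h
      simp [List.drop_eq_nil_of_le (Nat.le_of_not_lt h)] at hdrop
    have hget : cs[k]? = some l := by
      have := congrArg (·.head?) hdrop
      simpa [List.head?_drop] using this
    have hdrop' : cs.drop (k+1) = ls := by
      have := congrArg (·.tail) hdrop
      simpa [List.tail_drop] using this
    rw [PySem.List.enumerate_cons]
    simp only [List.foldl_cons]
    have hrec := ih (k+1) (pvA_step2 cs acc ((k : Int), l)) hdrop'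
    push_cast at hrec
    rw [hrec]
    simp only [hget]
    cases k with
    | zero =>
      simp [pvA_step2, pvSp, pvG]
    | succ m =>
      have hm : cs[m]? = some (cs[m]?.getD "") := by
        have hmlt : m < cs.length := Nat.lt_of_succ_lt hk
        simp [List.getElem?_eq_getElem hmlt]
      have hcast : ((m+1 : Nat) : Int) - 1 = ((m : Nat) : Int) := by push_cast; ring
      simp only [pvA_step2, pvSp, pvG]
      rw [hcast, PySem.List.pyGet?_natCast]
      by_cases hs : PySem.Str.startswith (PySem.Str.strip l) "section" <;>
        cases hg0 : cs[m]? with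
        | none => simp at hg0; omega
        | some p =>
          simp [hg0, Bool.and_assoc]
          try (by_cases h1 : PySem.Str.strip p = "" <;>
               by_cases h2 : PySem.Str.startswith (PySem.Str.strip p) "section" <;>
               simp_all [List.append_assoc])

theorem pvB_eq (ls : List String) : ∀ (acc : List String) (pe : Bool) (prev : Option String),
    (pe = true → ∃ q, prev = some q ∧ PySem.Str.strip q = "") →
    (ls.foldl pvB_step (acc, pe, prev)).1 = acc ++ pvSp prev (pvC1 pe ls) := by
  induction ls with
  | nil => intro acc pe prev _; simp [pvC1, pvSp]
  | cons l ls ih =>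
    intro acc pe prev hinv
    by_cases h : PySem.Str.strip l = ""
    · cases pe with
      | false =>
        have hnext := ih (acc ++ [""]) true (some "") (by intro _; exact ⟨"", rfl, by decide⟩)
        have hc : PySem.Chars.startswith (PySem.Chars.strip ([] : List Char))
            ['s','e','c','t','i','o','n'] = false := by decide
        simp [pvB_step, h, pvC1, pvSp, pvG, hnext, hc]
      | true =>
        obtain ⟨q, hq, hq0⟩ := hinv rfl
        have := ih acc true prev (by intro _; exact ⟨q, hq, hq0⟩)
        simp [pvB_step, h, pvC1, this]
    · have hnext := ih (acc ++ (if PySem.Str.startswith (PySem.Str.strip l) "section" && pvG prev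
          then ["", l] else [l])) false (some l) (by intro hc; cases hc)
      have hstep : pvB_step (acc, pe, prev) l =
          (acc ++ (if PySem.Str.startswith (PySem.Str.strip l) "section" && pvG prev
            then ["", l] else [l]), false, some l) := by
        cases prev <;> by_cases hs : PySem.Str.startswith (PySem.Str.strip l) "section" <;>
          simp [pvB_step, h, pvG] <;> split <;> simp
      rw [List.foldl_cons, hstep, hnext]
      cases pe <;> simp [pvC1, h, pvSp]

-- ===== VERDICT (by name: the statement is the Claim_ definition above) =====
theorem final_cleanup_py_spec : Claim_equal_final_cleanup_py := by
  intro s _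
  unfold Spec_final_cleanup_py final_cleanup_py final_cleanup_py_alt
  dsimp only
  have hA1 := pvA1_eq ((PySem.Str.split? s "\n").getD []) [] false
  have hA2 := pvA2_eq (((PySem.Str.split? s "\n").getD []).foldl pvA_step1 ([], false)).1
      (((PySem.Str.split? s "\n").getD []).foldl pvA_step1 ([], false)).1 0 [] (by simp)
  have hB := pvB_eq ((PySem.Str.split? s "\n").getD []) [] false none (by intro hc; cases hc)
  simp only [Nat.cast_zero, List.nil_append, reduceIte] at hA1 hA2 hB
  rw [hB, hA2, hA1]
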